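-- pv_equiv track=rewrite | github.com/kozqkurq/Develop_test | judge_maker.py | make_judge
-- ===== SOURCE A (Python) =====
-- def make_judge(grade, points):
--     result = None
--     counter = 0
--
--     # 成績による判定
--     if grade in ["A", "B", "C"]:
--         result = 1
--     elif grade == "D":
--         result = 2
--     elif grade == "E":
--         result = 3
--
--     # 点数による判定
--     for point in points:
--         # 10点未満が存在する場合
--         if point < 10 :
--             result = 3
--             break
--
--         # 30点以下が3つ以上存在する場合
--         elif point <= 30:
--             counter += 1
--             if counter >= 3:
--                 result = 2
--
--     # # 点数による判定(集合)
--     # set10 = {i for i in range(1,10)}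
--     # set30 = {i for i in range(10, 31)}
--     # # 10点未満が存在する場合
--     # if set10.isdisjoint(set(points)):
--     #     result = 3
--     # # 30点以下が3つ以上存在する場合
--     # elif set30.isdisjoint(set(points)):
--     #     if len(set30 & set(points)) >= 3:
--     #         result = 2
--
--     return result
-- ===== SOURCE B (Python) =====
-- def make_judge(grade, points):
--     if any(p < 10 for p in points):
--         return 3
--     if sum(1 for p in points if p <= 30) >= 3:
--         return 2
--     if grade in ("A", "B", "C"):
--         return 1
--     if grade == "D":
--         return 2
--     if grade == "E":
--         return 3
--     return None
-- ===== Notes on version B (the rewrite author's own statement) =====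
-- stated objective: simpler
-- what changed: Replaced the fused stateful loop (running counter, early break, grade result possibly overwritten) with early returns over two independent stateless scans: an existence check for any point < 10, then a count of points <= 30, falling back to the grade table.
import Mathlib
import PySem

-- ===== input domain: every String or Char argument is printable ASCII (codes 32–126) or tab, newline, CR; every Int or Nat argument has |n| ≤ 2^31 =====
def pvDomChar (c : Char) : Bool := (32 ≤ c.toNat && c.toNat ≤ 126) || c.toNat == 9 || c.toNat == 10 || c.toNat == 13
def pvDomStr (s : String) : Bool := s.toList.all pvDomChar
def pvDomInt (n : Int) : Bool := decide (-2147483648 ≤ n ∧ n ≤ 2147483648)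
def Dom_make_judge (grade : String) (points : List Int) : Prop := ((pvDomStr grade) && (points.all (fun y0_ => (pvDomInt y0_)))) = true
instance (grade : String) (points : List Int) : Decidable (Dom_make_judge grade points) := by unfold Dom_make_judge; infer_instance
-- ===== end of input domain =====

-- B replaces A's fused stateful loop (counter + break) with two independent stateless scans
-- (any point < 10, then count of points ≤ 30) and early returns; same values, simpler decomposition.


-- ===== PORT A =====
-- A's for-loop with early break: state is (result, counter)
def makeJudgeLoop (points : List Int) (result : Option Int) (counter : Int) : Option Int :=
  match points with
  | [] => result
  | point :: rest =>
    if point < 10 then some 3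
    else if point ≤ 30 then
      let c := counter + 1
      makeJudgeLoop rest (if c ≥ 3 then some 2 else result) c
    else makeJudgeLoop rest result counter

def make_judge (grade : String) (points : List Int) : Option Int :=
  let result : Option Int :=
    if grade = "A" ∨ grade = "B" ∨ grade = "C" then some 1
    else if grade = "D" then some 2
    else if grade = "E" then some 3
    else none
  makeJudgeLoop points result 0

-- ===== PORT B =====
def make_judge_alt (grade : String) (points : List Int) : Option Int :=
  if points.any (fun p => p < 10) then some 3
  else if points.countP (fun p => p ≤ 30) ≥ 3 then some 2
  else if grade = "A" ∨ grade = "B" ∨ grade = "C" then some 1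
  else if grade = "D" then some 2
  else if grade = "E" then some 3
  else none

-- ===== PRECONDITION & SPEC =====
def Spec_make_judge (grade : String) (points : List Int) (out : Option Int) : Prop := out = make_judge_alt grade points
instance (grade : String) (points : List Int) (out : Option Int) : Decidable (Spec_make_judge grade points out) := by unfold Spec_make_judge; infer_instance

-- ===== CLAIM (what is proved, stated in full; the proofs are below) =====
def Claim_equal_make_judge : Prop := ∀ (grade : String) (points : List Int), Dom_make_judge grade points → Spec_make_judge grade points (make_judge grade points)

-- ===== LEMMAS AND PROOFS =====

-- Loop invariant: if counter ≥ 3 already forced result = some 2, the loop computes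
-- "any < 10 → 3; counter + #(≤30) ≥ 3 → 2; else result".
theorem makeJudgeLoop_eq (points : List Int) (result : Option Int) (counter : Int)
    (h : counter ≥ 3 → result = some 2) :
    makeJudgeLoop points result counter =
      if points.any (fun p => p < 10) then some 3
      else if counter + points.countP (fun p => p ≤ 30) ≥ 3 then some 2
      else result := by
  induction points generalizing result counter with
  | nil =>
    simp [makeJudgeLoop]
    intro hc
    exact h hc
  | cons p rest ih =>
    simp only [makeJudgeLoop]
    by_cases h10 : p < 10
    · simp [h10]
    · by_cases h30 : p ≤ 30
      · rw [ih (if counter + 1 ≥ 3 then some 2 else result) (counter + 1)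
          (by intro hc; simp [hc])]
        simp [h10, h30]
        split_ifs <;> first | rfl | omega
      · rw [ih result counter h]
        simp [h10, h30]

-- ===== VERDICT (by name: the statement is the Claim_ definition above) =====
theorem make_judge_spec : Claim_equal_make_judge := by
  intro grade points _
  unfold Spec_make_judge make_judge make_judge_alt
  rw [makeJudgeLoop_eq _ _ _ (by omega)]
  simp only [zero_add]
  split_ifs <;> first | rfl | omega
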